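-- pv_equiv track=rewrite | github.com/mehrdadsl254/vit | config.py | generate_layer_indices
-- ===== SOURCE A (Python) =====
-- from typing import List, Tuple, Optional
--
-- def generate_layer_indices(max_layers: int) -> List[int]:
--     """
--     Generate layer indices with pattern:
--     - 1,2,3,4,5 (by 1)
--     - 7,9,11 (by 2)
--     - 14,17,20,... (by 3)
--     """
--     layers = []
--
--     # First 5 layers (by 1)
--     for i in range(1, 6):
--         if i <= max_layers:
--             layers.append(i)
--
--     # Next layers (by 2)
--     current = 7
--     while current <= max_layers and current <= 11:
--         layers.append(current)
--         current += 2
--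
--     # Remaining layers (by 3)
--     current = 14
--     while current <= max_layers:
--         layers.append(current)
--         current += 3
--
--     return layers
-- ===== SOURCE B (Python) =====
-- def generate_layer_indices(max_layers):
--     # One loop with a value-dependent successor: step 1 below 5, step 2 below 11, step 3 afterwards.
--     layers = []
--     x = 1
--     while x <= max_layers:
--         layers.append(x)
--         x += 1 if x < 5 else 2 if x < 11 else 3
--     return layers
-- ===== Notes on version B (the rewrite author's own statement) =====
-- stated objective: simpler
-- what changed: Replaces A's three staged passes (a for-loop over range(1,6) plus two separate while-loops with different steps) by a single while-loop driven by one value-dependent successor function (step 1 below 5, 2 below 11, else 3).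
import Mathlib
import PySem

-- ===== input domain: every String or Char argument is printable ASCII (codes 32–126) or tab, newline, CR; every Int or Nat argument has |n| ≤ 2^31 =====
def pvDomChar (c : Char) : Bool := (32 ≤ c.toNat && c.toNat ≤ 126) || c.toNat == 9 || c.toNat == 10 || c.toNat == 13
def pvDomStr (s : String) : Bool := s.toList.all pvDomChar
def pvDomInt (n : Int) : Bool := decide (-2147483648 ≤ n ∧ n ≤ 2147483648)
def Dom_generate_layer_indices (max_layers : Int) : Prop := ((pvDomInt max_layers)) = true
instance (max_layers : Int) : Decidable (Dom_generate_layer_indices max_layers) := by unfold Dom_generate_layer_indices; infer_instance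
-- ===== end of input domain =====

-- B replaces A's three staged loops by a single loop driven by a value-dependent step function (objective: simpler).

-- ===== PORT A =====
-- 'while current <= max_layers and current <= 11: layers.append(current); current += 2'
def pvALoop2 (m current : Int) : List Int :=
  if _h : current ≤ m ∧ current ≤ 11 then current :: pvALoop2 m (current + 2) else []
  termination_by (12 - current).toNat
  decreasing_by omega

-- 'while current <= max_layers: layers.append(current); current += 3'
def pvALoop3 (m current : Int) : List Int :=
  if _h : current ≤ m then current :: pvALoop3 m (current + 3) else []
  termination_by (m + 1 - current).toNat
  decreasing_by omega

def generate_layer_indices (max_layers : Int) : List Int :=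
  let layers := (PySem.List.pyRange 1 6 1).foldl
    (fun acc i => if i ≤ max_layers then acc ++ [i] else acc) []
  layers ++ pvALoop2 max_layers 7 ++ pvALoop3 max_layers 14

-- ===== PORT B =====
-- '1 if x < 5 else 2 if x < 11 else 3'
def pvStep (x : Int) : Int := if x < 5 then 1 else if x < 11 then 2 else 3

theorem pvStep_pos (x : Int) : 1 ≤ pvStep x := by
  unfold pvStep; split_ifs <;> omega

-- 'while x <= max_layers: layers.append(x); x += step(x)'
def pvBLoop (m x : Int) : List Int :=
  if _h : x ≤ m then x :: pvBLoop m (x + pvStep x) else []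
  termination_by (m + 1 - x).toNat
  decreasing_by have := pvStep_pos x; omega

def generate_layer_indices_alt (max_layers : Int) : List Int :=
  pvBLoop max_layers 1

-- ===== PRECONDITION & SPEC =====
def Spec_generate_layer_indices (max_layers : Int) (out : List Int) : Prop := out = generate_layer_indices_alt max_layers
instance (max_layers : Int) (out : List Int) : Decidable (Spec_generate_layer_indices max_layers out) := by unfold Spec_generate_layer_indices; infer_instance

-- ===== CLAIM (what is proved, stated in full; the proofs are below) =====
def Claim_equal_generate_layer_indices : Prop := ∀ (max_layers : Int), Dom_generate_layer_indices max_layers → Spec_generate_layer_indices max_layers (generate_layer_indices max_layers)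

-- ===== LEMMAS AND PROOFS =====

-- past 11, B's loop is exactly A's step-3 loop
theorem pvB_eq_loop3 (m : Int) (x : Int) (hx : 11 ≤ x) :
    pvBLoop m x = pvALoop3 m x := by
  fun_induction pvALoop3 m x with
  | case1 x h ih =>
      rw [pvBLoop.eq_def, dif_pos h]
      have hs : pvStep x = 3 := by unfold pvStep; split_ifs <;> omega
      rw [hs]
      rw [ih (by omega)]
  | case2 x h =>
      rw [pvBLoop.eq_def, dif_neg h]

theorem pvALoop3_nil (m : Int) (h : m < 14) : pvALoop3 m 14 = [] := by
  rw [pvALoop3.eq_def]; simp; omega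

-- B's loop from 1 = filtered literal prefix ++ A's step-3 loop from 14, one start value at a time
theorem pvB_from_11 (m : Int) :
    pvBLoop m 11 = (([11] : List Int).filter (fun z => decide (z ≤ m))) ++ pvALoop3 m 14 := by
  rw [pvBLoop.eq_def, show (11 : Int) + pvStep 11 = 14 from by decide]
  by_cases h : (11 : Int) ≤ m
  · rw [dif_pos h, pvB_eq_loop3 m 14 (by omega)]
    simp [h]
  · rw [dif_neg h, pvALoop3_nil m (by omega)]
    simp [h]

theorem pvB_from_9 (m : Int) :
    pvBLoop m 9 = (([9, 11] : List Int).filter (fun z => decide (z ≤ m))) ++ pvALoop3 m 14 := by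
  rw [pvBLoop.eq_def, show (9 : Int) + pvStep 9 = 11 from by decide]
  by_cases h : (9 : Int) ≤ m
  · rw [dif_pos h, pvB_from_11]
    simp [h]
  · rw [dif_neg h, pvALoop3_nil m (by omega)]
    have hn11 : ¬ (11 : Int) ≤ m := by omega
    simp [h, hn11]

theorem pvB_from_7 (m : Int) :
    pvBLoop m 7 = (([7, 9, 11] : List Int).filter (fun z => decide (z ≤ m))) ++ pvALoop3 m 14 := by
  rw [pvBLoop.eq_def, show (7 : Int) + pvStep 7 = 9 from by decide]
  by_cases h : (7 : Int) ≤ m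
  · rw [dif_pos h, pvB_from_9]
    simp [h]
  · rw [dif_neg h, pvALoop3_nil m (by omega)]
    have hn9 : ¬ (9 : Int) ≤ m := by omega
    have hn11 : ¬ (11 : Int) ≤ m := by omega
    simp [h, hn9, hn11]

theorem pvB_from_5 (m : Int) :
    pvBLoop m 5 = (([5, 7, 9, 11] : List Int).filter (fun z => decide (z ≤ m))) ++ pvALoop3 m 14 := by
  rw [pvBLoop.eq_def, show (5 : Int) + pvStep 5 = 7 from by decide]
  by_cases h : (5 : Int) ≤ m
  · rw [dif_pos h, pvB_from_7]
    simp [h]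
  · rw [dif_neg h, pvALoop3_nil m (by omega)]
    have hn7 : ¬ (7 : Int) ≤ m := by omega
    have hn9 : ¬ (9 : Int) ≤ m := by omega
    have hn11 : ¬ (11 : Int) ≤ m := by omega
    simp [h, hn7, hn9, hn11]

theorem pvB_from_4 (m : Int) :
    pvBLoop m 4 = (([4, 5, 7, 9, 11] : List Int).filter (fun z => decide (z ≤ m))) ++ pvALoop3 m 14 := by
  rw [pvBLoop.eq_def, show (4 : Int) + pvStep 4 = 5 from by decide]
  by_cases h : (4 : Int) ≤ m
  · rw [dif_pos h, pvB_from_5]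
    simp [h]
  · rw [dif_neg h, pvALoop3_nil m (by omega)]
    have hn5 : ¬ (5 : Int) ≤ m := by omega
    have hn7 : ¬ (7 : Int) ≤ m := by omega
    have hn9 : ¬ (9 : Int) ≤ m := by omega
    have hn11 : ¬ (11 : Int) ≤ m := by omega
    simp [h, hn5, hn7, hn9, hn11]

theorem pvB_from_3 (m : Int) :
    pvBLoop m 3 = (([3, 4, 5, 7, 9, 11] : List Int).filter (fun z => decide (z ≤ m))) ++ pvALoop3 m 14 := by
  rw [pvBLoop.eq_def, show (3 : Int) + pvStep 3 = 4 from by decide]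
  by_cases h : (3 : Int) ≤ m
  · rw [dif_pos h, pvB_from_4]
    simp [h]
  · rw [dif_neg h, pvALoop3_nil m (by omega)]
    have hn4 : ¬ (4 : Int) ≤ m := by omega
    have hn5 : ¬ (5 : Int) ≤ m := by omega
    have hn7 : ¬ (7 : Int) ≤ m := by omega
    have hn9 : ¬ (9 : Int) ≤ m := by omega
    have hn11 : ¬ (11 : Int) ≤ m := by omega
    simp [h, hn4, hn5, hn7, hn9, hn11]

theorem pvB_from_2 (m : Int) :
    pvBLoop m 2 = (([2, 3, 4, 5, 7, 9, 11] : List Int).filter (fun z => decide (z ≤ m))) ++ pvALoop3 m 14 := by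
  rw [pvBLoop.eq_def, show (2 : Int) + pvStep 2 = 3 from by decide]
  by_cases h : (2 : Int) ≤ m
  · rw [dif_pos h, pvB_from_3]
    simp [h]
  · rw [dif_neg h, pvALoop3_nil m (by omega)]
    have hn3 : ¬ (3 : Int) ≤ m := by omega
    have hn4 : ¬ (4 : Int) ≤ m := by omega
    have hn5 : ¬ (5 : Int) ≤ m := by omega
    have hn7 : ¬ (7 : Int) ≤ m := by omega
    have hn9 : ¬ (9 : Int) ≤ m := by omega
    have hn11 : ¬ (11 : Int) ≤ m := by omega
    simp [h, hn3, hn4, hn5, hn7, hn9, hn11]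

theorem pvB_from_1 (m : Int) :
    pvBLoop m 1 = (([1, 2, 3, 4, 5, 7, 9, 11] : List Int).filter (fun z => decide (z ≤ m))) ++ pvALoop3 m 14 := by
  rw [pvBLoop.eq_def, show (1 : Int) + pvStep 1 = 2 from by decide]
  by_cases h : (1 : Int) ≤ m
  · rw [dif_pos h, pvB_from_2]
    simp [h]
  · rw [dif_neg h, pvALoop3_nil m (by omega)]
    have hn2 : ¬ (2 : Int) ≤ m := by omega
    have hn3 : ¬ (3 : Int) ≤ m := by omega
    have hn4 : ¬ (4 : Int) ≤ m := by omega
    have hn5 : ¬ (5 : Int) ≤ m := by omega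
    have hn7 : ¬ (7 : Int) ≤ m := by omega
    have hn9 : ¬ (9 : Int) ≤ m := by omega
    have hn11 : ¬ (11 : Int) ≤ m := by omega
    simp [h, hn2, hn3, hn4, hn5, hn7, hn9, hn11]

-- A-side: the two prefix passes produce the same filtered literal lists
theorem pv_foldl15 (m : Int) :
    (([1, 2, 3, 4, 5] : List Int).foldl (fun acc i => if i ≤ m then acc ++ [i] else acc) []) =
      ([1, 2, 3, 4, 5] : List Int).filter (fun x => decide (x ≤ m)) := by
  simp only [List.foldl, List.filter_cons, List.filter_nil, decide_eq_true_eq]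
  split_ifs <;> rfl

theorem pv_loop2_eq (m : Int) :
    pvALoop2 m 7 = ([7, 9, 11] : List Int).filter (fun x => decide (x ≤ m)) := by
  rw [pvALoop2, pvALoop2, pvALoop2, pvALoop2]
  simp only [List.filter_cons, List.filter_nil, decide_eq_true_eq]
  split_ifs <;> simp_all <;> omega

-- ===== VERDICT (by name: the statement is the Claim_ definition above) =====
theorem generate_layer_indices_spec : Claim_equal_generate_layer_indices := by
  intro m _
  show generate_layer_indices m = generate_layer_indices_alt m
  simp only [generate_layer_indices, generate_layer_indices_alt]
  rw [show PySem.List.pyRange 1 6 1 = [1, 2, 3, 4, 5] from by decide,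
      pv_foldl15, pv_loop2_eq, pvB_from_1,
      show ([1, 2, 3, 4, 5, 7, 9, 11] : List Int) = [1, 2, 3, 4, 5] ++ [7, 9, 11] from rfl,
      List.filter_append, List.append_assoc]
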